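-- pv_equiv track=rewrite | github.com/aalpkk/nox-project | agent/confluence.py | _deduplicate_signals
-- ===== SOURCE A (Python) =====
-- def _deduplicate_signals(ticker_signals):
--     """Her screener'dan sadece en son tarihli sinyali al."""
--     by_screener = {}
--     for s in ticker_signals:
--         scr = s['screener']
--         by_screener.setdefault(scr, []).append(s)
--
--     result = []
--     for scr, sigs in by_screener.items():
--         latest_date = max(s.get('csv_date', '') for s in sigs)
--         latest = [s for s in sigs if s.get('csv_date', '') == latest_date]
--         result.extend(latest)
--     return result
-- ===== SOURCE B (Python) =====
-- def _deduplicate_signals(ticker_signals):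
--     """Her screener'dan sadece en son tarihli sinyali al.
--
--     Single pass: per screener keep only the running-best date and a buffer of
--     signals carrying it; no grouping pass, no per-group re-scan.
--     """
--     best = {}  # screener -> (best_date, buffer)
--     for s in ticker_signals:
--         scr = s['screener']
--         d = s.get('csv_date', '')
--         cur = best.get(scr)
--         if cur is None:
--             best[scr] = (d, [s])
--         else:
--             bd, buf = cur
--             if bd < d:
--                 best[scr] = (d, [s])
--             elif d == bd:
--                 best[scr] = (bd, buf + [s])
--     result = []
--     for bd, buf in best.values():
--         result.extend(buf)
--     return result
-- ===== Notes on version B (the rewrite author's own statement) =====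
-- stated objective: alternative
-- what changed: Replaces group-then-rescan (build per-screener groups, then for each group compute the max date and filter the group again) by a single pass keeping, per screener, the running best date and a buffer of the signals carrying it.
import Mathlib
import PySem

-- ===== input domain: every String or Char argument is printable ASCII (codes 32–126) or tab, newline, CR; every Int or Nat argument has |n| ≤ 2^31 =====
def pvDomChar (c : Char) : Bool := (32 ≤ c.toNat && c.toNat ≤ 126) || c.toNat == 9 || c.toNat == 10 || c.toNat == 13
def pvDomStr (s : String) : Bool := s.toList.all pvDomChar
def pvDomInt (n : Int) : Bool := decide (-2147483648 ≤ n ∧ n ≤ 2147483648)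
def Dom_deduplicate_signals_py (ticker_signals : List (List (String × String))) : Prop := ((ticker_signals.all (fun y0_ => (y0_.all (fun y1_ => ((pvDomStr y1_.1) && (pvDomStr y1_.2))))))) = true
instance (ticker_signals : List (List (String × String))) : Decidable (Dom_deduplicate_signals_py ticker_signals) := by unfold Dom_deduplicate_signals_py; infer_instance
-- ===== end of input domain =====

-- B replaces A's group-then-rescan (build per-screener groups, then max+filter each group)
-- by a single pass keeping, per screener, the running best date and a buffer of signals carrying it.


-- shared tiny helpers: a signal is a dict; s[k] / s.get(k, '') — exact (first match)
def pvGet (s : List (String × String)) (k : String) : Option String := (PySem.Dict.mk s).get? k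
def pvDate (s : List (String × String)) : String := (pvGet s "csv_date").getD ""

-- ===== PORT A =====
-- one iteration of A's second loop body: max over the group's dates, then filter the group
-- (max over a nonempty group; the .getD "" default is unreachable since groups are nonempty)
def pvGroupLatest (sigs : List (List (String × String))) : List (List (String × String)) :=
  let latest_date := (PySem.List.max? (sigs.map pvDate) (fun x => x)).getD ""
  sigs.filter (fun s => pvDate s == latest_date)

def deduplicate_signals_py (ticker_signals : List (List (String × String))) : List (List (String × String)) :=
  let by_screener : PySem.Dict String (List (List (String × String))) :=
    ticker_signals.foldl (fun d s =>
      match pvGet s "screener" with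
      | some scr => d.modify scr [] (· ++ [s])  -- setdefault(scr, []).append(s)
      | none => d)                              -- KeyError in Python: excluded by Pre_
      PySem.Dict.empty
  by_screener.items.foldl (fun res p => res ++ pvGroupLatest p.2) []

-- ===== PORT B =====
def pvStepB (d : PySem.Dict String (String × List (List (String × String))))
    (s : List (String × String)) : PySem.Dict String (String × List (List (String × String))) :=
  match pvGet s "screener" with
  | none => d                                   -- KeyError in Python: excluded by Pre_
  | some scr =>
    let dt := (pvGet s "csv_date").getD ""
    match d.get? scr with
    | none => d.insert scr (dt, [s])
    | some (bd, buf) =>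
      if bd < dt then d.insert scr (dt, [s])
      else if dt == bd then d.insert scr (bd, buf ++ [s])
      else d

def deduplicate_signals_py_alt (ticker_signals : List (List (String × String))) : List (List (String × String)) :=
  let best := ticker_signals.foldl pvStepB PySem.Dict.empty
  best.items.foldl (fun res p => res ++ p.2.2) []

-- ===== PRECONDITION & SPEC =====
-- Pre_ excludes exactly the inputs where some signal lacks the 'screener' key: there the
-- Python A (and B) raises KeyError instead of returning.
def Pre_deduplicate_signals_py (ticker_signals : List (List (String × String))) : Prop :=
  ∀ s ∈ ticker_signals, ((PySem.Dict.mk s).contains "screener") = true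
instance (ticker_signals : List (List (String × String))) : Decidable (Pre_deduplicate_signals_py ticker_signals) := by unfold Pre_deduplicate_signals_py; infer_instance

def pvWitness_deduplicate_signals_py : (List (List (String × String))) :=
  [[("screener", "sA"), ("csv_date", "2024-01-02")], [("screener", "sA"), ("csv_date", "2024-01-01")]]

def Spec_deduplicate_signals_py (ticker_signals : List (List (String × String))) (out : List (List (String × String))) : Prop := out = deduplicate_signals_py_alt ticker_signals
instance (ticker_signals : List (List (String × String))) (out : List (List (String × String))) : Decidable (Spec_deduplicate_signals_py ticker_signals out) := by unfold Spec_deduplicate_signals_py; infer_instance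

-- ===== CLAIM (what is proved, stated in full; the proofs are below) =====
def Claim_equal_deduplicate_signals_py : Prop := ∀ (ticker_signals : List (List (String × String))), Dom_deduplicate_signals_py ticker_signals → Pre_deduplicate_signals_py ticker_signals → Spec_deduplicate_signals_py ticker_signals (deduplicate_signals_py ticker_signals)

-- ===== LEMMAS AND PROOFS =====

-- the per-group summary B maintains: (max date of the group, its signals carrying it)
def pvP (g : List (List (String × String))) : String × List (List (String × String)) :=
  ((PySem.List.max? (g.map pvDate) (fun x => x)).getD "", pvGroupLatest g)

-- A's loop body, named for the proofs
def pvStepA (d : PySem.Dict String (List (List (String × String))))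
    (s : List (String × String)) : PySem.Dict String (List (List (String × String))) :=
  match pvGet s "screener" with
  | some scr => d.modify scr [] (· ++ [s])
  | none => d

def pvInv (dA : PySem.Dict String (List (List (String × String))))
    (dB : PySem.Dict String (String × List (List (String × String)))) : Prop :=
  dB.items = dA.items.map (fun p => (p.1, pvP p.2)) ∧ dA.keys.Nodup ∧ ∀ p ∈ dA.items, p.2 ≠ []

theorem pvMax_append (g : List (List (String × String))) (hg : g ≠ []) (s : List (String × String)) :
    (PySem.List.max? ((g ++ [s]).map pvDate) (fun x => x)).getD "" =
      max ((PySem.List.max? (g.map pvDate) (fun x => x)).getD "") (pvDate s) := by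
  obtain ⟨x, t, rfl⟩ := List.exists_cons_of_ne_nil hg
  simp [PySem.List.max?_id_cons, List.foldl_append]

theorem pvP_append (g : List (List (String × String))) (hg : g ≠ []) (s : List (String × String)) :
    pvP (g ++ [s]) =
      (if (pvP g).1 < pvDate s then (pvDate s, [s])
       else if pvDate s == (pvP g).1 then ((pvP g).1, (pvP g).2 ++ [s])
       else pvP g) := by
  have hle : ∀ x ∈ g, pvDate x ≤ (PySem.List.max? (g.map pvDate) (fun y => y)).getD "" := by
    cases hmax : PySem.List.max? (g.map pvDate) (fun y => y) with
    | none =>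
      exact absurd ((PySem.List.max?_eq_none_iff _ _).mp hmax) (by simp [hg])
    | some m =>
      intro x hx
      simpa using PySem.List.max?_isMax hmax (pvDate x) (List.mem_map_of_mem hx)
  have hM := pvMax_append g hg s
  unfold pvP pvGroupLatest
  simp only [hM, List.filter_append]
  by_cases h1 : (PySem.List.max? (g.map pvDate) (fun y => y)).getD "" < pvDate s
  · have hmax : max ((PySem.List.max? (g.map pvDate) (fun y => y)).getD "") (pvDate s) = pvDate s :=
      max_eq_right h1.le
    have hnil : g.filter (fun x => pvDate x == pvDate s) = [] := by
      rw [List.filter_eq_nil_iff]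
      intro x hx
      have := lt_of_le_of_lt (hle x hx) h1
      simp [beq_iff_eq]
      exact ne_of_lt this
    simp [hmax, h1, hnil]
  · have hds : pvDate s ≤ (PySem.List.max? (g.map pvDate) (fun y => y)).getD "" := le_of_not_gt h1
    have hmax : max ((PySem.List.max? (g.map pvDate) (fun y => y)).getD "") (pvDate s) =
        (PySem.List.max? (g.map pvDate) (fun y => y)).getD "" := max_eq_left hds
    by_cases h2 : pvDate s = (PySem.List.max? (g.map pvDate) (fun y => y)).getD ""
    · simp [h2]
    · simp [hmax, h1, h2]

theorem pvInv_step (dA : PySem.Dict String (List (List (String × String))))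
    (dB : PySem.Dict String (String × List (List (String × String))))
    (s : List (String × String)) (h : pvInv dA dB) : pvInv (pvStepA dA s) (pvStepB dB s) := by
  obtain ⟨hit, hnd, hne⟩ := h
  unfold pvStepA pvStepB
  cases hscr : pvGet s "screener" with
  | none => exact ⟨hit, hnd, hne⟩
  | some scr =>
    dsimp only
    have hkeysB : dB.keys = dA.keys := by
      show dB.items.map Prod.fst = dA.items.map Prod.fst
      rw [hit, List.map_map]; rfl
    have hmod : dA.modify scr [] (· ++ [s]) = dA.insert scr ((dA.getD scr []) ++ [s]) := rfl
    by_cases hc : dA.contains scr = true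
    · -- screener already present: both dicts update the entry in place
      have hscrk : scr ∈ dA.keys := (PySem.Dict.contains_iff_mem_keys dA scr).mp hc
      obtain ⟨p0, hp0, hp1⟩ := List.mem_map.mp hscrk
      have hp' : (scr, p0.2) ∈ dA.items := by rw [← hp1, Prod.mk.eta]; exact hp0
      obtain ⟨g, hp⟩ : ∃ g, (scr, g) ∈ dA.items := ⟨p0.2, hp'⟩
      have hgA : dA.get? scr = some g := PySem.Dict.get?_of_mem_items dA hp hnd
      have hgne : g ≠ [] := hne _ hp
      have hgD : dA.getD scr [] = g := by simp [PySem.Dict.getD_eq_get?_getD, hgA]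
      have hndB : dB.keys.Nodup := hkeysB ▸ hnd
      have hgB : dB.get? scr = some (pvP g) := by
        apply PySem.Dict.get?_of_mem_items dB _ hndB
        rw [hit]
        exact List.mem_map.mpr ⟨(scr, g), hp, rfl⟩
      have hcB : dB.contains scr = true := by
        rw [PySem.Dict.contains_iff_mem_keys, hkeysB]; exact hscrk
      have hPapp := pvP_append g hgne s
      have hdt : pvDate s = (pvGet s "csv_date").getD "" := rfl
      have huniq : ∀ p ∈ dA.items, p.1 = scr → p = (scr, g) := by
        intro p hpmem hp1
        have h1 : dA.get? p.1 = some p.2 := PySem.Dict.get?_of_mem_items dA (by rw [Prod.mk.eta]; exact hpmem) hnd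
        rw [hp1, hgA] at h1
        obtain ⟨q1, q2⟩ := p
        simp only at hp1
        cases h1; subst hp1; rfl
      have hitA : (dA.insert scr (g ++ [s])).items =
          dA.items.map (fun p => if (p.1 == scr) = true then (scr, g ++ [s]) else p) :=
        PySem.Dict.items_insert_of_contains dA _ hc
      have hkeyA : (dA.insert scr (g ++ [s])).keys = dA.keys := by
        show (dA.insert scr (g ++ [s])).items.map Prod.fst = dA.items.map Prod.fst
        rw [hitA, List.map_map]
        apply List.map_congr_left
        intro p hpmem
        by_cases hpe : p.1 = scr
        · simp [hpe]
        · simp [hpe]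
      rw [hmod, hgD, hgB]
      refine ⟨?_, hkeyA ▸ hnd, ?_⟩
      · -- items relation
        rw [hitA, List.map_map]
        rcases hPg : pvP g with ⟨bd, buf⟩
        rw [hPg] at hPapp
        dsimp only
        by_cases h1 : bd < (pvGet s "csv_date").getD ""
        · rw [if_pos h1]
          rw [PySem.Dict.items_insert_of_contains dB _ hcB, hit, List.map_map]
          apply List.map_congr_left
          intro p hpmem
          by_cases hpe : (p.1 == scr) = true
          · have := huniq p hpmem (beq_iff_eq.mp hpe)
            subst this
            simp only [Function.comp, hpe, if_pos]
            rw [← hdt] at h1 ⊢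
            rw [hPapp, if_pos h1]
          · simp [Function.comp, hpe]
        · by_cases h2 : (pvGet s "csv_date").getD "" = bd
          · rw [if_neg h1, if_pos (beq_iff_eq.mpr h2)]
            rw [PySem.Dict.items_insert_of_contains dB _ hcB, hit, List.map_map]
            apply List.map_congr_left
            intro p hpmem
            by_cases hpe : (p.1 == scr) = true
            · have := huniq p hpmem (beq_iff_eq.mp hpe)
              subst this
              simp only [Function.comp, hpe, if_pos]
              rw [← hdt] at h1 h2
              rw [hPapp, if_neg h1, if_pos (beq_iff_eq.mpr h2)]
            · simp [Function.comp, hpe]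
          · rw [if_neg h1, if_neg (by simpa using h2)]
            rw [hit]
            apply List.map_congr_left
            intro p hpmem
            by_cases hpe : (p.1 == scr) = true
            · have := huniq p hpmem (beq_iff_eq.mp hpe)
              subst this
              simp only [Function.comp, hpe, if_pos]
              rw [← hdt] at h1 h2
              rw [hPapp, if_neg h1, if_neg (by simpa using h2), hPg]
            · simp [Function.comp, hpe]
      · -- groups stay nonempty
        intro p hpmem
        rw [hitA] at hpmem
        obtain ⟨q, hq, hqe⟩ := List.mem_map.mp hpmem
        by_cases hpe : (q.1 == scr) = true
        · rw [if_pos hpe] at hqe; subst hqe; simp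
        · rw [if_neg hpe] at hqe; subst hqe; exact hne _ hq
    · -- fresh screener: both dicts append a new entry
      have hc' : dA.contains scr = false := by simpa using hc
      have hscrk : scr ∉ dA.keys := fun hm => hc ((PySem.Dict.contains_iff_mem_keys dA scr).mpr hm)
      have hgB : dB.get? scr = none := by
        rw [PySem.Dict.get?_eq_none_iff_not_mem_keys, hkeysB]; exact hscrk
      have hcB : dB.contains scr = false := by
        rw [← Bool.not_eq_true]
        intro hmm
        exact hscrk (hkeysB ▸ (PySem.Dict.contains_iff_mem_keys dB scr).mp hmm)
      have hgD : dA.getD scr [] = [] := PySem.Dict.getD_of_not_contains dA [] hc'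
      rw [hmod, hgD, hgB]
      refine ⟨?_, ?_, ?_⟩
      · rw [PySem.Dict.items_insert_of_not_contains dA _ hc',
            PySem.Dict.items_insert_of_not_contains dB _ hcB, hit, List.map_append]
        simp [pvP, pvGroupLatest, PySem.List.max?_id_cons, pvDate]
      · exact PySem.Dict.nodup_keys_insert dA scr _ hnd
      · intro p hpmem
        rw [PySem.Dict.items_insert_of_not_contains dA _ hc'] at hpmem
        rcases List.mem_append.mp hpmem with hl | hr
        · exact hne _ hl
        · simp at hr; subst hr; simp

theorem pvInv_fold (l : List (List (String × String)))
    (dA : PySem.Dict String (List (List (String × String))))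
    (dB : PySem.Dict String (String × List (List (String × String))))
    (h : pvInv dA dB) : pvInv (l.foldl pvStepA dA) (l.foldl pvStepB dB) := by
  induction l generalizing dA dB with
  | nil => exact h
  | cons x t ih => exact ih _ _ (pvInv_step _ _ _ h)

-- ===== VERDICT (by name: the statement is the Claim_ definition above) =====
theorem deduplicate_signals_py_spec : Claim_equal_deduplicate_signals_py := by
  intro ts _ _
  unfold Spec_deduplicate_signals_py deduplicate_signals_py deduplicate_signals_py_alt
  have h := pvInv_fold ts PySem.Dict.empty PySem.Dict.empty (by
    refine ⟨rfl, ?_, ?_⟩ <;> simp [PySem.Dict.empty, PySem.Dict.keys])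
  obtain ⟨hitems, _, _⟩ := h
  have hA : (ts.foldl (fun d s =>
      match pvGet s "screener" with
      | some scr => d.modify scr [] (· ++ [s])
      | none => d) PySem.Dict.empty) = ts.foldl pvStepA PySem.Dict.empty := rfl
  rw [hA]
  rw [PySem.List.foldl_append_eq_flatMap, PySem.List.foldl_append_eq_flatMap, hitems]
  simp [List.flatMap_map, pvP]
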